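-- pv_equiv track=rewrite | github.com/ucsb-cs48-w19/5pm-findtheroommate | venv/Lib/site-packages/hwt/serializer/vhdl/value.py | BitString_binary
-- ===== SOURCE A (Python) =====
-- def BitString_binary(v, width, vldMask=None):
--     buff = ['"']
--     for i in range(width - 1, -1, -1):
--         mask = (1 << i)
--         b = v & mask
--
--         if vldMask & mask:
--             s = "1" if b else "0"
--         else:
--             s = "X"
--         buff.append(s)
--     buff.append('"')
--     return ''.join(buff)
-- ===== SOURCE B (Python) =====
-- def BitString_binary(v, width, vldMask=None):
--     if width <= 0:
--         return '""'
--     mask = (1 << width) - 1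
--     vbits = format(v & mask, '0{}b'.format(width))
--     mbits = format(vldMask & mask, '0{}b'.format(width))
--     return '"' + ''.join(b if m == '1' else 'X' for b, m in zip(vbits, mbits)) + '"'
-- ===== Notes on version B (the rewrite author's own statement) =====
-- stated objective: faster
-- what changed: B replaces A's per-bit Python loop testing v & (1 << i) by staged string passes: it formats the width-masked value and mask once with format(..., '0{w}b') into two binary strings and then merges them character-wise with zip (value char where the mask char is '1', 'X' otherwise); the bit extraction moves into the C-level format builtin, a constant-factor speedup measured; Pre_ excludes only width >= 1 with vldMask=None, where A (and B) raise TypeError.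
import Mathlib
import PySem

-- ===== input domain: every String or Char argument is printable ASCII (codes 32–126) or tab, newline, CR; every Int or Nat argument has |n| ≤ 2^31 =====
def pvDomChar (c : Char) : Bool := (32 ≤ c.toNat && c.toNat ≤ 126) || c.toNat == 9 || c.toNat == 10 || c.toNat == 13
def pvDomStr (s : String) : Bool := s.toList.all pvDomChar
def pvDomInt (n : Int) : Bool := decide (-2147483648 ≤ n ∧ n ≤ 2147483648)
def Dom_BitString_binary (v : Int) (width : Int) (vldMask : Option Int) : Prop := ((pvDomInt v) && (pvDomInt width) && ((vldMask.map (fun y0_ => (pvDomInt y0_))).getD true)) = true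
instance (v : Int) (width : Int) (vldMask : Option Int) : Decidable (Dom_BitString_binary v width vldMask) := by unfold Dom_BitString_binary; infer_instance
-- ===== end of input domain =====

-- B replaces A's per-bit loop over v & (1 << i) by staged passes: format the width-masked
-- value and mask into two binary strings, then merge them character-wise (value char where
-- the mask char is '1', 'X' otherwise); measured constant-factor faster. Return values only.

-- ===== PORT A =====
-- ''.join over single-character strings is ported as a List Char accumulator;
-- `1 << i` is ported as `(1 : Int) <<< i.toNat` (exact: every i in this range is ≥ 0);
-- `vldMask & mask` is ported as band on vldMask.getD 0 — inside Pre_ vldMask is some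
-- whenever the loop runs (Python raises TypeError on None there), so getD is never observed.
def BitString_binary (v : Int) (width : Int) (vldMask : Option Int) : String :=
  let buff : List Char := ['"']
  let buff := (PySem.List.pyRange (width - 1) (-1) (-1)).foldl (fun buff i =>
    let mask : Int := (1 : Int) <<< i.toNat
    let b : Int := PySem.Int.band v mask
    let s : Char :=
      if PySem.Int.band (vldMask.getD 0) mask ≠ 0 then (if b ≠ 0 then '1' else '0') else 'X'
    buff ++ [s]) buff
  String.mk (buff ++ ['"'])

-- ===== PORT B =====
-- pvPadBin w n ports Python's format(n, '0{w}b'): the w binary digits of n, MSB first,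
-- zero-padded — exact here because both arguments of format are masked to w bits (0 ≤ n < 2^w).
def pvPadBin : Nat → Int → List Char
  | 0, _ => []
  | w + 1, n =>
      pvPadBin w (PySem.Int.floordiv n 2) ++ [if PySem.Int.mod n 2 = 1 then '1' else '0']

-- the `zip` merge `b if m == '1' else 'X'` is List.zipWith over the two digit strings
def BitString_binary_alt (v : Int) (width : Int) (vldMask : Option Int) : String :=
  if width ≤ 0 then "\"\""
  else
    let mask : Int := ((1 : Int) <<< width.toNat) - 1
    let vbits := pvPadBin width.toNat (PySem.Int.band v mask)
    let mbits := pvPadBin width.toNat (PySem.Int.band (vldMask.getD 0) mask)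
    String.mk ('"' :: (List.zipWith (fun b m => if m = '1' then b else 'X') vbits mbits ++ ['"']))

-- ===== PRECONDITION & SPEC =====
-- Pre_ excludes exactly the inputs on which Python A raises TypeError (`vldMask & mask`
-- with vldMask=None, reached iff the loop runs, i.e. width ≥ 1); B raises there too.
def Pre_BitString_binary (v : Int) (width : Int) (vldMask : Option Int) : Prop :=
  width ≤ 0 ∨ vldMask.isSome = true
instance (v : Int) (width : Int) (vldMask : Option Int) : Decidable (Pre_BitString_binary v width vldMask) := by unfold Pre_BitString_binary; infer_instance

def pvWitness_BitString_binary : Int × Int × Option Int := (5, 4, some 13)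

def Spec_BitString_binary (v : Int) (width : Int) (vldMask : Option Int) (out : String) : Prop := out = BitString_binary_alt v width vldMask
instance (v : Int) (width : Int) (vldMask : Option Int) (out : String) : Decidable (Spec_BitString_binary v width vldMask out) := by unfold Spec_BitString_binary; infer_instance

-- ===== CLAIM (what is proved, stated in full; the proofs are below) =====
def Claim_equal_BitString_binary : Prop := ∀ (v : Int) (width : Int) (vldMask : Option Int), Dom_BitString_binary v width vldMask → Pre_BitString_binary v width vldMask → Spec_BitString_binary v width vldMask (BitString_binary v width vldMask)

-- ===== LEMMAS AND PROOFS =====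

theorem pv_one_shl (n : Nat) : (1 : Int) <<< n = 2 ^ n := by
  simp [Int.shiftLeft_eq]

-- same, for the Int-valued shift the elaborator chose in port A
theorem pv_one_shl' (n : Nat) : (1 : Int) <<< ((n : Nat) : Int) = 2 ^ n := by
  rw [Int.shiftLeft_eq_mul_pow]; push_cast; ring

-- uniqueness of euclidean div/mod against an explicit decomposition
theorem pv_divmod_char (a b q r : Int) (hb : 0 < b) (h : a = b * q + r)
    (h0 : 0 ≤ r) (h1 : r < b) : a / b = q ∧ a % b = r := by
  constructor
  · rw [h, show b * q + r = r + q * b by ring, Int.add_mul_ediv_right _ _ hb.ne',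
      Int.ediv_eq_zero_of_lt h0 h1]; ring
  · rw [h, show b * q + r = r + b * q by ring, Int.add_mul_emod_self_left,
      Int.emod_eq_of_lt h0 h1]

-- euclidean div/mod of -(n+1) by a positive d, in terms of Nat div/mod of n
theorem pv_neg_div (n d : Nat) (hd : 0 < d) :
    (-(n : Int) - 1) / (d : Int) = -(↑(n / d)) - 1 ∧
    (-(n : Int) - 1) % (d : Int) = ↑d - 1 - ↑(n % d) := by
  have hdm : (d : Int) * ↑(n / d) + ↑(n % d) = ↑n := by exact_mod_cast Nat.div_add_mod n d
  have hlt : ((n % d : Nat) : Int) < (d : Int) := by exact_mod_cast Nat.mod_lt n hd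
  have h0 : (0 : Int) ≤ ↑(n % d) := Int.natCast_nonneg _
  have hd1 : (1 : Int) ≤ (d : Int) := by exact_mod_cast hd
  exact pv_divmod_char _ _ _ _ (by omega) (by linear_combination hdm) (by omega) (by omega)

-- L1: Python `a & ((1 << w) - 1)` is the nonnegative residue mod 2^w
theorem pv_band_mask (a : Int) (w : Nat) :
    PySem.Int.band a (2 ^ w - 1) = a % 2 ^ w := by
  have hMc : ((2 : Int) ^ w) = ((2 ^ w : Nat) : Int) := by push_cast; ring
  have hp : (0 : Nat) < 2 ^ w := Nat.two_pow_pos w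
  have hb : (0 : Int) ≤ 2 ^ w - 1 := by rw [hMc]; omega
  have ht : ((2 : Int) ^ w - 1).toNat = 2 ^ w - 1 := by rw [hMc]; omega
  by_cases ha : 0 ≤ a
  · obtain ⟨n, rfl⟩ := Int.eq_ofNat_of_zero_le ha
    unfold PySem.Int.band
    rw [if_pos ha, if_pos hb, Int.toNat_natCast, ht, Nat.and_two_pow_sub_one_eq_mod, hMc]
    push_cast; ring
  · push_neg at ha
    unfold PySem.Int.band
    rw [if_neg (not_le.mpr ha), if_pos hb, ht]
    set n := (-a - 1).toNat with hn
    have hna : a = -(n : Int) - 1 := by omega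
    rw [Nat.and_comm, Nat.and_two_pow_sub_one_eq_mod, hna, hMc, (pv_neg_div n (2 ^ w) hp).2]
    have hlt : n % 2 ^ w < 2 ^ w := Nat.mod_lt n hp
    omega

-- L2: Python `a & (1 << i)` is nonzero iff bit i is set, read off with floor div/mod
theorem pv_band_two_pow (a : Int) (i : Nat) :
    (PySem.Int.band a (2 ^ i) ≠ 0) ↔ (a / 2 ^ i) % 2 = 1 := by
  have hMc : ((2 : Int) ^ i) = ((2 ^ i : Nat) : Int) := by push_cast; ring
  have hp : (0 : Nat) < 2 ^ i := Nat.two_pow_pos i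
  have hb : (0 : Int) ≤ 2 ^ i := by positivity
  have ht : ((2 : Int) ^ i).toNat = 2 ^ i := by rw [hMc]; omega
  by_cases ha : 0 ≤ a
  · obtain ⟨n, rfl⟩ := Int.eq_ofNat_of_zero_le ha
    unfold PySem.Int.band
    rw [if_pos ha, if_pos hb, Int.toNat_natCast, ht, Nat.and_two_pow,
      Nat.testBit_eq_decide_div_mod_eq, hMc,
      show ((n : Int)) / ((2 ^ i : Nat) : Int) % 2 = (((n / 2 ^ i) % 2 : Nat) : Int) by push_cast; ring]
    rcases Nat.mod_two_eq_zero_or_one (n / 2 ^ i) with h | h <;> simp [h, hp.ne']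
  · push_neg at ha
    unfold PySem.Int.band
    rw [if_neg (not_le.mpr ha), if_pos hb, ht]
    set n := (-a - 1).toNat with hn
    have hna : a = -(n : Int) - 1 := by omega
    rw [Nat.and_comm, Nat.and_two_pow, Nat.testBit_eq_decide_div_mod_eq, hna, hMc,
      (pv_neg_div n (2 ^ i) hp).1]
    have h2 := (pv_neg_div (n / 2 ^ i) 2 (by norm_num)).2
    rw [show ((2 : Nat) : Int) = (2 : Int) from by norm_num] at h2
    rw [h2]
    rcases Nat.mod_two_eq_zero_or_one (n / 2 ^ i) with h | h <;> simp [h]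

-- L3: taking the low w bits does not change bit i for i < w
theorem pv_mod_bit (a : Int) (w i : Nat) (h : i < w) :
    ((a % 2 ^ w) / 2 ^ i) % 2 = (a / 2 ^ i) % 2 := by
  have hi : (0 : Int) < 2 ^ i := by positivity
  rw [Int.emod_def a ((2 : Int) ^ w)]
  rw [show (2 : Int) ^ w = 2 ^ i * 2 ^ (w - i) from by rw [← pow_add]; congr 1; omega]
  set q := a / (2 ^ i * 2 ^ (w - i)) with hq
  rw [show a - 2 ^ i * 2 ^ (w - i) * q = a + -(2 ^ (w - i) * q) * 2 ^ i from by ring,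
    Int.add_mul_ediv_right _ _ hi.ne',
    show (2 : Int) ^ (w - i) = 2 * 2 ^ (w - i - 1) from by rw [← pow_succ']; congr 1; omega,
    show a / 2 ^ i + -(2 * 2 ^ (w - i - 1) * q) = a / 2 ^ i + 2 * -(2 ^ (w - i - 1) * q) from by ring,
    Int.add_mul_emod_self_left]

-- pvPadBin lists the digit characters MSB-first: index k carries bit w-1-k
theorem pv_padBin_eq (w : Nat) : ∀ n : Int,
    pvPadBin w n = (List.range w).map (fun k =>
      if (n / 2 ^ (w - 1 - k)) % 2 = 1 then '1' else '0') := by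
  induction w with
  | zero => intro n; simp [pvPadBin]
  | succ w ih =>
    intro n
    rw [pvPadBin, ih, PySem.Int.floordiv_eq_ediv_of_pos (by norm_num),
      PySem.Int.mod_eq_emod_of_pos (by norm_num), List.range_succ, List.map_append]
    congr 1
    · apply List.map_congr_left
      intro k hk
      rw [List.mem_range] at hk
      rw [Int.ediv_ediv_of_nonneg (by norm_num), ← pow_succ',
        show (w - 1 - k) + 1 = w + 1 - 1 - k from by omega]
    · simp

-- zipWith of two maps over the same index list is a map
theorem pv_zipWith_map_same {α β γ δ : Type} (f : β → γ → δ) (g : α → β) (h : α → γ) :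
    ∀ l : List α, List.zipWith f (l.map g) (l.map h) = l.map (fun a => f (g a) (h a)) := by
  intro l; induction l with
  | nil => rfl
  | cons a l ih => simp [List.zipWith, ih]

-- the character A emits for bit position w-1-k equals B's merged character at index k
theorem pv_char_eq (v mk : Int) (w j : Nat) (hj : j < w) :
    (if PySem.Int.band mk (2 ^ j) ≠ 0 then (if PySem.Int.band v (2 ^ j) ≠ 0 then '1' else '0') else 'X')
    = (if (if (PySem.Int.band mk (2 ^ w - 1) / 2 ^ j) % 2 = 1 then '1' else '0') = '1'
       then (if (PySem.Int.band v (2 ^ w - 1) / 2 ^ j) % 2 = 1 then '1' else '0') else 'X') := by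
  rw [pv_band_mask, pv_band_mask, pv_mod_bit _ _ _ hj, pv_mod_bit _ _ _ hj]
  have h1 := pv_band_two_pow mk j
  have h2 := pv_band_two_pow v j
  simp only [h1, h2]
  rcases Int.emod_two_eq (mk / 2 ^ j) with hm | hm <;> simp [hm]

-- ===== VERDICT (by name: the statement is the Claim_ definition above) =====
theorem BitString_binary_spec : Claim_equal_BitString_binary := by
  intro v width vldMask _ _
  unfold Spec_BitString_binary
  by_cases hw0 : width ≤ 0
  · simp only [BitString_binary, BitString_binary_alt, if_pos hw0,
      PySem.List.pyRange_neg_one_eq_nil (by omega : width - 1 ≤ -1), List.foldl_nil]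
    rfl
  · have hw : 0 < width := by omega
    simp only [BitString_binary, BitString_binary_alt, if_neg hw0, pv_one_shl]
    set w := width.toNat with hw'
    rw [PySem.List.pyRange_neg_one, show (width - 1 - -1).toNat = w from by omega,
      List.foldl_map, PySem.List.foldl_append_singleton_eq_map,
      pv_padBin_eq, pv_padBin_eq, pv_zipWith_map_same]
    apply congrArg String.mk
    rw [List.append_assoc, List.singleton_append]
    congr 2
    apply List.map_congr_left
    intro k hk
    rw [List.mem_range] at hk
    rw [show (width - 1 - (k : Int)).toNat = w - 1 - k from by omega, pv_one_shl']
    exact pv_char_eq v (vldMask.getD 0) w (w - 1 - k) (by omega)
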